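-- pv_equiv track=rewrite | github.com/nylesclaire/py110 | small_problems/easy_5/9_staggered_case_pt2.py | staggered_case1
-- ===== SOURCE A (Python) =====
-- def staggered_case1(given_str):
--     result_str = ""
--     alpha_idx = -1
--     for char in given_str:
--         if char.isalpha():
--             alpha_idx += 1
--             if alpha_idx % 2 == 0:
--                 result_str += char.upper()
--             else:
--                 result_str += char.lower()
--         else:
--             result_str += char
--     return result_str
-- ===== SOURCE B (Python) =====
-- def staggered_case1(given_str):
--     # Stateless per-position formulation: the case of each alphabetic character
--     # is determined by the parity of the number of alphabetic characters in the
--     # prefix before it; non-alpha characters are kept as-is.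
--     def prefix_alphas(i):
--         return sum(1 for ch in given_str[:i] if ch.isalpha())
--     return ''.join(
--         (c.upper() if prefix_alphas(i) % 2 == 0 else c.lower()) if c.isalpha() else c
--         for i, c in enumerate(given_str))
-- ===== Notes on version B (the rewrite author's own statement) =====
-- stated objective: alternative
-- what changed: A is one stateful loop carrying a running alpha counter and building the result by concatenation; B is stateless: for each position it computes the case from the parity of the count of alphabetic characters in the prefix before it (a closed per-position rule), trading the running state for O(n^2) prefix counts.
import Mathlib
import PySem

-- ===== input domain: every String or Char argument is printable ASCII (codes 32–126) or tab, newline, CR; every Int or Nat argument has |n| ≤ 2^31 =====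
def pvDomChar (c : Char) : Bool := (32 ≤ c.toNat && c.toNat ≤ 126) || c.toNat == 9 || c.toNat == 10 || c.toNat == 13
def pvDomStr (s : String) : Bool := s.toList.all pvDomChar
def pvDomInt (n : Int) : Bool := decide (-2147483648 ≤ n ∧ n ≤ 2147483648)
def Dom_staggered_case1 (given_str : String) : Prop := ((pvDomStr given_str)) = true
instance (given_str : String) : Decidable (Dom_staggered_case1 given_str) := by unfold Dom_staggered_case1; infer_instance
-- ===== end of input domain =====

-- B replaces A's running alpha counter by a stateless per-position rule (parity of the
-- alpha count of the prefix before each position); same return value, no speed claim.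

-- ===== PORT A =====
def staggered_case1 (given_str : String) : String :=
  let r := given_str.toList.foldl (fun (st : List Char × Int) c =>
    if PySem.Chars.isalpha c then
      let i := st.2 + 1
      (st.1 ++ [if PySem.Int.mod i 2 == 0 then PySem.Chars.upperChar c else PySem.Chars.lowerChar c], i)
    else (st.1 ++ [c], st.2)) ([], -1)
  String.ofList r.1

-- ===== PORT B =====
-- sum(1 for ch in given_str[:i] if ch.isalpha())  — alpha count of the prefix before i
def pvPrefixAlphas (full : List Char) (i : Int) : Int :=
  ((PySem.List.slice full none (some i)).filter PySem.Chars.isalpha).length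

def staggered_case1_alt (given_str : String) : String :=
  String.ofList ((PySem.List.enumerate given_str.toList 0).map (fun ic =>
    if PySem.Chars.isalpha ic.2 then
      if PySem.Int.mod (pvPrefixAlphas given_str.toList ic.1) 2 == 0
      then PySem.Chars.upperChar ic.2 else PySem.Chars.lowerChar ic.2
    else ic.2))

-- ===== PRECONDITION & SPEC =====
def Spec_staggered_case1 (given_str : String) (out : String) : Prop := out = staggered_case1_alt given_str
instance (given_str : String) (out : String) : Decidable (Spec_staggered_case1 given_str out) := by unfold Spec_staggered_case1; infer_instance

-- ===== CLAIM (what is proved, stated in full; the proofs are below) =====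
def Claim_equal_staggered_case1 : Prop := ∀ (given_str : String), Dom_staggered_case1 given_str → Spec_staggered_case1 given_str (staggered_case1 given_str)

-- ===== LEMMAS AND PROOFS =====
theorem staggered_loop_eq (full : List Char) (cs : List Char) : ∀ (pre acc : List Char) (k : Int),
    full = pre ++ cs → k = ((pre.filter PySem.Chars.isalpha).length : Int) - 1 →
    (cs.foldl (fun (st : List Char × Int) c =>
      if PySem.Chars.isalpha c then
        let i := st.2 + 1
        (st.1 ++ [if PySem.Int.mod i 2 == 0 then PySem.Chars.upperChar c else PySem.Chars.lowerChar c], i)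
      else (st.1 ++ [c], st.2)) (acc, k)).1
    = acc ++ (PySem.List.enumerate cs (pre.length : Int)).map (fun ic =>
        if PySem.Chars.isalpha ic.2 then
          if PySem.Int.mod (pvPrefixAlphas full ic.1) 2 == 0
          then PySem.Chars.upperChar ic.2 else PySem.Chars.lowerChar ic.2
        else ic.2) := by
  induction cs with
  | nil => intro pre acc k _ _; simp [PySem.List.enumerate_nil]
  | cons c cs ih =>
    intro pre acc k hfull hk
    have hpref : pvPrefixAlphas full (pre.length : Int)
        = ((pre.filter PySem.Chars.isalpha).length : Int) := by
      simp [pvPrefixAlphas, hfull, PySem.List.slice_to_natCast]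
    have hfull' : full = (pre ++ [c]) ++ cs := by simp [hfull]
    have hlen : (((pre ++ [c]).length : Nat) : Int) = (pre.length : Int) + 1 := by
      simp
    by_cases h : PySem.Chars.isalpha c = true
    · have hk' : k + 1 = (((pre ++ [c]).filter PySem.Chars.isalpha).length : Int) - 1 := by
        simp [List.filter_append, h]
        omega
      have hk1 : k + 1 = pvPrefixAlphas full (pre.length : Int) := by
        rw [hpref]; omega
      simp only [List.foldl_cons, h, if_pos]
      rw [ih (pre ++ [c]) _ (k + 1) hfull' hk']
      rw [PySem.List.enumerate_cons, List.map_cons, hlen, hk1]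
      simp [h]
    · have hk' : k = (((pre ++ [c]).filter PySem.Chars.isalpha).length : Int) - 1 := by
        simpa [List.filter_append, h] using hk
      simp only [List.foldl_cons, h, if_neg, Bool.false_eq_true, not_false_iff]
      rw [ih (pre ++ [c]) (acc ++ [c]) k hfull' hk']
      rw [PySem.List.enumerate_cons, List.map_cons, hlen]
      simp [h]

-- ===== VERDICT (by name: the statement is the Claim_ definition above) =====
theorem staggered_case1_spec : Claim_equal_staggered_case1 := by
  intro s _
  have h := staggered_loop_eq s.toList s.toList [] [] (-1) (by simp) (by simp)
  simp only [Spec_staggered_case1, staggered_case1, staggered_case1_alt]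
  refine congrArg String.ofList ?_
  simpa using h
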